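-- pv_equiv track=rewrite | github.com/LoansBot/reddit-proxy | src/handlers/manager.py | _get_handle_style
-- ===== SOURCE A (Python) =====
-- DEFAULT_STYLE = {
--     '2xx': {'operation': 'copy', 'log_level': 'TRACE'},
--     '4xx': {'operation': 'failure', 'log_level': 'WARN'},
--     '5xx': {'operation': 'retry', 'log_level': 'WARN'}
-- }
--
-- FALLBACK_STYLE = DEFAULT_STYLE['5xx']
--
-- def _get_handle_style(style, status, defaults=DEFAULT_STYLE):
--     if status == 'success':
--         return {'operation': 'success', 'log_level': 'TRACE'}
--     if status == 'failure':
--         return {'operation': 'failure', 'log_level': 'TRACE'}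
--
--     if style is None:
--         if defaults is None:
--             raise Exception('should not get here - no style or fallback')
--         return _get_handle_style(defaults, status, defaults=None)
--
--     best_match = None
--     if style.get(str(status)) is not None:
--         best_match = style[str(status)]
--     elif style.get(str(status)[0] + 'xx') is not None:
--         best_match = style[str(status)[0] + 'xx']
--
--     if best_match is None:
--         if defaults is None:
--             return FALLBACK_STYLE
--         return _get_handle_style(defaults, status, defaults=None)
--
--     if defaults is not None:
--         best_match = best_match.copy()
--         fill_with = _get_handle_style(style, status, defaults=None)
--         for k, v in fill_with.items():
--             if k not in best_match:
--                 best_match[k] = v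
--
--     return best_match
-- ===== SOURCE B (Python) =====
-- DEFAULT_STYLE = {
--     '2xx': {'operation': 'copy', 'log_level': 'TRACE'},
--     '4xx': {'operation': 'failure', 'log_level': 'WARN'},
--     '5xx': {'operation': 'retry', 'log_level': 'WARN'}
-- }
--
-- FALLBACK_STYLE = DEFAULT_STYLE['5xx']
--
--
-- def _get_handle_style(style, status, defaults=DEFAULT_STYLE):
--     if status == 'success':
--         return {'operation': 'success', 'log_level': 'TRACE'}
--     if status == 'failure':
--         return {'operation': 'failure', 'log_level': 'TRACE'}
--
--     def lookup(source):
--         m = source.get(str(status))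
--         if m is None:
--             m = source.get(str(status)[0] + 'xx')
--         return m
--
--     if style is not None:
--         m = lookup(style)
--         if m is not None:
--             return m.copy() if defaults is not None else m
--     if defaults is None:
--         if style is None:
--             raise Exception('should not get here - no style or fallback')
--         return FALLBACK_STYLE
--     m = lookup(defaults)
--     return m if m is not None else FALLBACK_STYLE
-- ===== Notes on version B (the rewrite author's own statement) =====
-- stated objective: simpler
-- what changed: Replaces A's self-recursion (two nested synthetic calls with defaults=None) by one flat local lookup helper applied to style then defaults, and drops A's fill_with loop entirely since it provably never adds a key (it re-fetches the same matched dict).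
import Mathlib
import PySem

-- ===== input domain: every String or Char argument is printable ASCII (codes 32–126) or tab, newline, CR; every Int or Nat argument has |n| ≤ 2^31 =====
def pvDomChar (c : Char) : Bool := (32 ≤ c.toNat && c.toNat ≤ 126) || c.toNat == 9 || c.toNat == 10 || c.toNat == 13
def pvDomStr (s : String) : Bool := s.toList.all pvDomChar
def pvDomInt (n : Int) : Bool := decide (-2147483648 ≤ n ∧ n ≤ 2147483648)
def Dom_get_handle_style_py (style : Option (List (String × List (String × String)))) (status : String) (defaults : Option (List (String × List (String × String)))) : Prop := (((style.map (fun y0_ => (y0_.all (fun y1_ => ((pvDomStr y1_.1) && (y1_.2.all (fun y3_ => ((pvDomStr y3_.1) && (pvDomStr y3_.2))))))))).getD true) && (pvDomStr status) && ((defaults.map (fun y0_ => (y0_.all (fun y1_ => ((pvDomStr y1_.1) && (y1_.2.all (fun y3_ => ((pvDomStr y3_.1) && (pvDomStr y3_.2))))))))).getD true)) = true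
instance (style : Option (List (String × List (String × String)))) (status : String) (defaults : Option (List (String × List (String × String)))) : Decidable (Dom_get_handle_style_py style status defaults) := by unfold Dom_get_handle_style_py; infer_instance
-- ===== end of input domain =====

-- B replaces A's self-recursion and vacuous fill_with loop by one flat lookup helper; equivalence is
-- about the RETURN VALUE (Python object identity, copy-vs-shared, is not modelled by List equality).
-- ===== PORT A =====
-- dict.get(k): first match in the association list (exact Python dict semantics: keys are unique,
-- but first-match is correct on any list)
def pyDictGet? {α : Type} (l : List (String × α)) (k : String) : Option α :=
  match l with
  | [] => none
  | (k', v) :: t => if k' == k then some v else pyDictGet? t k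

-- d[k] = v: overwrite in place, append if the key is new (exact Python dict semantics)
def pyDictSet (l : List (String × String)) (k v : String) : List (String × String) :=
  match l with
  | [] => [(k, v)]
  | (k', v') :: t => if k' == k then (k', v) :: t else (k', v') :: pyDictSet t k v

def pySuccessStyle : List (String × String) := [("operation", "success"), ("log_level", "TRACE")]
def pyFailureStyle : List (String × String) := [("operation", "failure"), ("log_level", "TRACE")]
-- FALLBACK_STYLE = DEFAULT_STYLE['5xx']
def pyFallbackStyle : List (String × String) := [("operation", "retry"), ("log_level", "WARN")]

def get_handle_style_py (style : Option (List (String × List (String × String)))) (status : String) (defaults : Option (List (String × List (String × String)))) : List (String × String) :=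
  if status = "success" then pySuccessStyle
  else if status = "failure" then pyFailureStyle
  else
    match style with
    | none =>
      match defaults with
      | none => []  -- Python: raise Exception(...); excluded by Pre_
      | some d => get_handle_style_py (some d) status none
    | some s =>
      -- best_match: style.get(str(status)), else style.get(str(status)[0] + 'xx')
      let best_match : Option (List (String × String)) :=
        match pyDictGet? s status with
        | some m => some m
        | none =>
          match PySem.Str.pyGet? status 0 with
          | none => none  -- Python: IndexError on status[0]; excluded by Pre_
          | some c => pyDictGet? s (String.ofList [c] ++ "xx")
      match best_match with
      | none =>
        match defaults with
        | none => pyFallbackStyle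
        | some d => get_handle_style_py (some d) status none
      | some m =>
        match defaults with
        | none => m
        | some _ =>
          -- best_match = best_match.copy(); fill_with = _get_handle_style(style, status, None)
          let fill_with := get_handle_style_py (some s) status none
          -- for k, v in fill_with.items(): if k not in best_match: best_match[k] = v
          fill_with.foldl (fun acc kv =>
            if (pyDictGet? acc kv.1).isSome then acc
            else pyDictSet acc kv.1 kv.2) m
termination_by (match defaults with | some _ => 1 | none => 0)

-- ===== PORT B =====
-- lookup(source): source.get(str(status)) else source.get(str(status)[0] + 'xx')
def ghsAltLookup (status : String) (source : List (String × List (String × String))) : Option (List (String × String)) :=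
  match pyDictGet? source status with
  | some m => some m
  | none =>
    match PySem.Str.pyGet? status 0 with
    | none => none  -- Python: IndexError; excluded by Pre_
    | some c => pyDictGet? source (String.ofList [c] ++ "xx")

def get_handle_style_py_alt (style : Option (List (String × List (String × String)))) (status : String) (defaults : Option (List (String × List (String × String)))) : List (String × String) :=
  if status = "success" then [("operation", "success"), ("log_level", "TRACE")]
  else if status = "failure" then [("operation", "failure"), ("log_level", "TRACE")]
  else
    let fromStyle : Option (List (String × String)) :=
      match style with
      | some s => ghsAltLookup status s
      | none => none
    match fromStyle with
    | some m => m  -- (m.copy() vs m: identity only; same list value)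
    | none =>
      match defaults with
      | none =>
        match style with
        | none => []  -- Python: raise Exception(...); excluded by Pre_
        | some _ => [("operation", "retry"), ("log_level", "WARN")]
      | some d => (ghsAltLookup status d).getD [("operation", "retry"), ("log_level", "WARN")]

-- ===== PRECONDITION & SPEC =====
-- Pre_ excludes exactly the inputs on which A raises: the Exception when both style and
-- defaults are None, and the IndexError on status[0] when status is the empty string
-- (and not one of the two early-return keywords).
def Pre_get_handle_style_py (style : Option (List (String × List (String × String)))) (status : String) (defaults : Option (List (String × List (String × String)))) : Prop :=
  status = "success" ∨ status = "failure" ∨ (status ≠ "" ∧ (style ≠ none ∨ defaults ≠ none))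
instance (style : Option (List (String × List (String × String)))) (status : String) (defaults : Option (List (String × List (String × String)))) : Decidable (Pre_get_handle_style_py style status defaults) := by unfold Pre_get_handle_style_py; infer_instance
def pvWitness_get_handle_style_py : (Option (List (String × List (String × String)))) × String × (Option (List (String × List (String × String)))) := (some [("2xx", [("operation", "copy"), ("log_level", "TRACE")])], "204", some [("5xx", [("operation", "retry")])])

def Spec_get_handle_style_py (style : Option (List (String × List (String × String)))) (status : String) (defaults : Option (List (String × List (String × String)))) (out : List (String × String)) : Prop := out = get_handle_style_py_alt style status defaults
instance (style : Option (List (String × List (String × String)))) (status : String) (defaults : Option (List (String × List (String × String)))) (out : List (String × String)) : Decidable (Spec_get_handle_style_py style status defaults out) := by unfold Spec_get_handle_style_py; infer_instance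

-- ===== CLAIM (what is proved, stated in full; the proofs are below) =====
def Claim_equal_get_handle_style_py : Prop := ∀ (style : Option (List (String × List (String × String)))) (status : String) (defaults : Option (List (String × List (String × String)))), Dom_get_handle_style_py style status defaults → Pre_get_handle_style_py style status defaults → Spec_get_handle_style_py style status defaults (get_handle_style_py style status defaults)

-- ===== LEMMAS AND PROOFS =====
-- the fill_with loop adds nothing when started from a dict already containing all its keys
theorem foldl_fill_self (m l : List (String × String))
    (h : ∀ kv ∈ l, (pyDictGet? m kv.1).isSome = true) :
    l.foldl (fun acc kv =>
      if (pyDictGet? acc kv.1).isSome then acc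
      else pyDictSet acc kv.1 kv.2) m = m := by
  induction l with
  | nil => rfl
  | cons kv t ih =>
    simp only [List.foldl_cons, h kv (by simp), if_pos]
    exact ih (fun x hx => h x (by simp [hx]))

theorem get?_isSome_of_mem (m : List (String × String)) (kv : String × String) (h : kv ∈ m) :
    (pyDictGet? m kv.1).isSome = true := by
  induction m with
  | nil => cases h
  | cons a t ih =>
    simp only [pyDictGet?]
    by_cases hk : a.1 == kv.1
    · simp [hk]
    · rcases List.mem_cons.mp h with rfl | hm
      · simp at hk
      · simp only [if_neg hk]; exact ih hm

-- one unfolding of A's recursive call with defaults = none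
theorem ghs_rec_none (s : List (String × List (String × String))) (status : String)
    (hs : status ≠ "success") (hf : status ≠ "failure") :
    get_handle_style_py (some s) status none = (ghsAltLookup status s).getD pyFallbackStyle := by
  rw [get_handle_style_py]
  simp only [if_neg hs, if_neg hf, ghsAltLookup]
  cases hm : pyDictGet? s status with
  | some m => simp
  | none =>
    simp only [hm]
    cases hg : PySem.Str.pyGet? status 0 with
    | none => simp
    | some c =>
      simp only [hg]
      cases h2 : pyDictGet? s (String.ofList [c] ++ "xx") <;> simp [h2]

-- ===== VERDICT (by name: the statement is the Claim_ definition above) =====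
theorem get_handle_style_py_spec : Claim_equal_get_handle_style_py := by
  intro style status defaults _ hpre
  unfold Spec_get_handle_style_py
  by_cases hs : status = "success"
  · rw [get_handle_style_py.eq_def]
    simp [get_handle_style_py_alt, hs, pySuccessStyle]
  by_cases hf : status = "failure"
  · rw [get_handle_style_py.eq_def]
    simp [get_handle_style_py_alt, hs, hf, pyFailureStyle]
  have hne : status ≠ "" ∧ (style ≠ none ∨ defaults ≠ none) := by
    rcases hpre with h | h | h
    · exact absurd h hs
    · exact absurd h hf
    · exact h
  cases style with
  | none =>
    cases defaults with
    | none => rcases hne.2 with h | h <;> simp at h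
    | some d =>
      rw [get_handle_style_py.eq_def]
      simp only [if_neg hs, if_neg hf]
      rw [ghs_rec_none d status hs hf]
      simp only [get_handle_style_py_alt, if_neg hs, if_neg hf]
      cases h2 : ghsAltLookup status d <;> simp [h2, pyFallbackStyle]
  | some st =>
    rw [get_handle_style_py.eq_def]
    simp only [if_neg hs, if_neg hf]
    cases hm : ghsAltLookup status st with
    | none =>
      have hm' := hm
      unfold ghsAltLookup at hm'
      cases defaults with
      | none =>
        simp only [get_handle_style_py_alt, if_neg hs, if_neg hf, hm]
        cases h1 : pyDictGet? st status with
        | some m => rw [h1] at hm'; simp at hm'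
        | none =>
          simp only [h1]
          cases hg : PySem.Str.pyGet? status 0 with
          | none => simp [hg, pyFallbackStyle]
          | some c =>
            rw [h1, hg] at hm'
            simp only [hg]
            simp only at hm'
            simp [hm', pyFallbackStyle]
      | some d =>
        simp only [get_handle_style_py_alt, if_neg hs, if_neg hf, hm]
        cases h1 : pyDictGet? st status with
        | some m => rw [h1] at hm'; simp at hm'
        | none =>
          simp only [h1]
          cases hg : PySem.Str.pyGet? status 0 with
          | none =>
            rw [ghs_rec_none d status hs hf]
            cases h2 : ghsAltLookup status d <;> simp [h2, pyFallbackStyle]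
          | some c =>
            rw [h1, hg] at hm'
            simp only [hg]
            simp only at hm'
            simp only [hm']
            rw [ghs_rec_none d status hs hf]
            cases h2 : ghsAltLookup status d <;> simp [h2, pyFallbackStyle]
    | some m =>
      have hm' := hm
      unfold ghsAltLookup at hm'
      simp only [get_handle_style_py_alt, if_neg hs, if_neg hf, hm]
      have hbm : (match pyDictGet? st status with
        | some m => some m
        | none =>
          match PySem.Str.pyGet? status 0 with
          | none => none
          | some c => pyDictGet? st (String.ofList [c] ++ "xx")) = some m := hm'
      rw [hbm]
      cases defaults with
      | none => simp
      | some d =>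
        simp only
        rw [ghs_rec_none st status hs hf, hm]
        simp only [Option.getD_some]
        exact foldl_fill_self m m (fun kv hkv => get?_isSome_of_mem m kv hkv)
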